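-- pv_equiv track=rewrite | github.com/mortazavilab/agoutic | cortex/dataframe_actions.py | _deduplicate_labels
-- ===== SOURCE A (Python) =====
-- def _deduplicate_labels(labels: list[str]) -> list[str]:
--     counts: dict[str, int] = {}
--     unique: list[str] = []
--     for raw_label in labels:
--         label = str(raw_label).strip() or "set"
--         next_count = counts.get(label, 0) + 1
--         counts[label] = next_count
--         unique.append(label if next_count == 1 else f"{label} ({next_count})")
--     return unique
-- ===== SOURCE B (Python) =====
-- def _deduplicate_labels(labels: list[str]) -> list[str]:
--     groups: dict[str, list[int]] = {}
--     for i, raw in enumerate(labels):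
--         label = str(raw).strip() or "set"
--         groups.setdefault(label, []).append(i)
--     out = [""] * len(labels)
--     for label, positions in groups.items():
--         for k, pos in enumerate(positions):
--             out[pos] = label if k == 0 else f"{label} ({k + 1})"
--     return out
-- ===== Notes on version B (the rewrite author's own statement) =====
-- stated objective: alternative
-- what changed: B replaces A's single pass with a running counter dict by a two-phase group-and-scatter: it first groups the positions of each normalized label in a dict label -> list of indices, then allocates a result list and scatters each group's occurrences back, numbering them by their rank within the group.
import Mathlib
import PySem

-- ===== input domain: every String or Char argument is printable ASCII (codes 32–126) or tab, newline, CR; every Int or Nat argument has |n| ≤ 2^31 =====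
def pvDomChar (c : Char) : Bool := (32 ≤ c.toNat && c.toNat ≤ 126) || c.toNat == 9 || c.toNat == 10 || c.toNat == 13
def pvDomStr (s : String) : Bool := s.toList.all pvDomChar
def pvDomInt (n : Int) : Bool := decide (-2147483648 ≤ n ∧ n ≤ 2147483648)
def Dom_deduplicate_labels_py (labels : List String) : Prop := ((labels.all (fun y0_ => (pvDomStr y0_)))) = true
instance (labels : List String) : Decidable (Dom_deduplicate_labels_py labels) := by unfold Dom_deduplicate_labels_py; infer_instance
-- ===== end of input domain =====

-- B replaces A's one-pass running counter by a two-phase group-and-scatter (objective: alternative).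

-- shared normalization: str(x).strip() or "set"  (both Pythons contain this exact expression)
def pvStripOr (s : String) : String :=
  let t := PySem.Str.strip s
  if t = "" then "set" else t

-- ===== PORT A =====
def deduplicate_labels_py (labels : List String) : List String :=
  (labels.foldl
    (fun (st : PySem.Dict String Int × List String) raw_label =>
      let label := pvStripOr raw_label
      let next_count := st.1.getD label 0 + 1
      (st.1.insert label next_count,
       st.2 ++ [if next_count == 1 then label
                else label ++ " (" ++ PySem.Int.toStr next_count ++ ")"]))
    (PySem.Dict.empty, [])).2

-- ===== PORT B =====
-- phase 1: groups.setdefault(label, []).append(i)  =  modify label [] (· ++ [i])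
-- phase 2: out = [""] * len(labels); scatter each group's positions back (out[pos], pos a
-- nonnegative in-range index produced by enumerate, hence .toNat is exact)
def deduplicate_labels_py_alt (labels : List String) : List String :=
  let groups := (PySem.List.enumerate labels).foldl
    (fun (g : PySem.Dict String (List Int)) p =>
      g.modify (pvStripOr p.2) [] (fun q => q ++ [p.1]))
    PySem.Dict.empty
  let out0 := List.replicate labels.length ""
  groups.items.foldl
    (fun out kv =>
      (PySem.List.enumerate kv.2).foldl
        (fun out kp =>
          out.set kp.2.toNat (if kp.1 == 0 then kv.1
            else kv.1 ++ " (" ++ PySem.Int.toStr (kp.1 + 1) ++ ")"))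
        out)
    out0

-- ===== PRECONDITION & SPEC =====
def Spec_deduplicate_labels_py (labels : List String) (out : List String) : Prop := out = deduplicate_labels_py_alt labels
instance (labels : List String) (out : List String) : Decidable (Spec_deduplicate_labels_py labels out) := by unfold Spec_deduplicate_labels_py; infer_instance

-- ===== CLAIM (what is proved, stated in full; the proofs are below) =====
def Claim_equal_deduplicate_labels_py : Prop := ∀ (labels : List String), Dom_deduplicate_labels_py labels → Spec_deduplicate_labels_py labels (deduplicate_labels_py labels)

-- ===== LEMMAS AND PROOFS =====

-- decorated label for the c-th occurrence (c ≥ 1)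
def pvDec (s : String) (c : Int) : String :=
  if c == 1 then s else s ++ " (" ++ PySem.Int.toStr c ++ ")"

-- the common specification: the label list decorated by occurrence number, given the processed prefix
def pvTarget (pre : List String) : List String → List String
  | [] => []
  | s :: rest => pvDec s ((pre.count s : Int) + 1) :: pvTarget (pre ++ [s]) rest

theorem pvTarget_snoc (pre l : List String) (y : String) :
    pvTarget pre (l ++ [y]) = pvTarget pre l ++ [pvDec y (((pre ++ l).count y : Int) + 1)] := by
  induction l generalizing pre with
  | nil => simp [pvTarget]
  | cons a t ih => simp [pvTarget, ih, List.append_assoc]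

-- ---- A-side: the counter fold computes pvTarget ----

def pvAstep (st : PySem.Dict String Int × List String) (raw_label : String) :
    PySem.Dict String Int × List String :=
  let label := pvStripOr raw_label
  let next_count := st.1.getD label 0 + 1
  (st.1.insert label next_count,
   st.2 ++ [if next_count == 1 then label
            else label ++ " (" ++ PySem.Int.toStr next_count ++ ")"])

theorem pvA_eq_foldl (labels : List String) :
    deduplicate_labels_py labels = (labels.foldl pvAstep (PySem.Dict.empty, [])).2 := rfl

theorem pvAfold_invariant (l : List String) :
    (∀ s : String,
      (l.foldl pvAstep (PySem.Dict.empty, [])).1.getD s 0 = ((l.map pvStripOr).count s : Int))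
    ∧
    (l.foldl pvAstep (PySem.Dict.empty, [])).2 = pvTarget [] (l.map pvStripOr) := by
  induction l using List.reverseRecOn with
  | nil =>
    refine ⟨fun s => ?_, rfl⟩
    simp [PySem.Dict.empty, PySem.Dict.getD, PySem.Dict.get?]
  | append_singleton l x ih =>
    obtain ⟨ihd, iha⟩ := ih
    rw [List.foldl_append]
    simp only [List.foldl_cons, List.foldl_nil]
    constructor
    · intro s
      show ((l.foldl pvAstep (PySem.Dict.empty, [])).1.insert (pvStripOr x) _).getD s 0 = _
      rw [PySem.Dict.getD_insert, List.map_append, List.count_append]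
      by_cases hs : s = pvStripOr x
      · subst hs; rw [if_pos rfl, ihd]; simp
      · rw [if_neg hs, ihd]
        have : List.count s [pvStripOr x] = 0 := by
          simp [List.count_singleton]; exact fun h => hs h.symm
        simp only [List.map_cons, List.map_nil]
        omega
    · show (l.foldl pvAstep (PySem.Dict.empty, [])).2 ++ _ = _
      rw [List.map_append, List.map_cons, List.map_nil, pvTarget_snoc, iha, ihd]
      simp [pvDec]

-- ---- B-side helpers ----

def pvG (labels : List String) : PySem.Dict String (List Int) :=
  (PySem.List.enumerate labels).foldl
    (fun (g : PySem.Dict String (List Int)) p =>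
      g.modify (pvStripOr p.2) [] (fun q => q ++ [p.1]))
    PySem.Dict.empty

-- positions of normalized label s, in order
def pvP (labels : List String) (s : String) : List Int :=
  ((PySem.List.enumerate labels).filter (fun p => pvStripOr p.2 == s)).map (·.1)

def pvW (s : String) (o : List String) (kp : Int × Int) : List String :=
  o.set kp.2.toNat (if kp.1 == 0 then s else s ++ " (" ++ PySem.Int.toStr (kp.1 + 1) ++ ")")

def pvInner (kv : String × List Int) (out : List String) : List String :=
  (PySem.List.enumerate kv.2).foldl (pvW kv.1) out

def pvScat (items : List (String × List Int)) (out : List String) : List String :=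
  items.foldl (fun out kv => pvInner kv out) out

theorem pvB_eq (labels : List String) :
    deduplicate_labels_py_alt labels =
      pvScat (pvG labels).items (List.replicate labels.length "") := rfl

theorem pvG_getD (labels : List String) (s : String) :
    (pvG labels).getD s [] = pvP labels s := by
  have h : pvG labels =
      ((PySem.List.enumerate labels).map (fun p => (pvStripOr p.2, p.1))).foldl
        (fun d q => d.modify q.1 [] (fun x => x ++ [q.2])) PySem.Dict.empty := by
    rw [List.foldl_map]; rfl
  rw [h, PySem.Dict.getD_foldl_modify_append, pvP, List.filter_map]
  simp [List.map_map, Function.comp_def]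

theorem pvG_keys (labels : List String) :
    (pvG labels).keys = PySem.Set.ofList (labels.map pvStripOr) := by
  unfold pvG
  rw [PySem.Dict.keys_foldl_modify_key (PySem.List.enumerate labels)
      (fun p => pvStripOr p.2) [] (fun _ p q => q ++ [p.1]) PySem.Dict.empty]
  rw [show (PySem.Dict.empty : PySem.Dict String (List Int)).keys = [] from rfl,
    PySem.Set.update_nil_left]
  congr 1
  conv_rhs => rw [← PySem.List.map_snd_enumerate labels 0]
  rw [List.map_map]
  rfl

theorem pvG_nodup (labels : List String) : (pvG labels).keys.Nodup := by
  unfold pvG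
  exact PySem.Dict.nodup_keys_foldl_modify_key (PySem.List.enumerate labels)
    (fun p => pvStripOr p.2) [] (fun _ p q => q ++ [p.1]) PySem.Dict.empty
    (by rw [show (PySem.Dict.empty : PySem.Dict String (List Int)).keys = [] from rfl]; exact List.nodup_nil)

theorem pvG_contains (labels : List String) (s : String) :
    (pvG labels).contains s = true ↔ s ∈ labels.map pvStripOr := by
  rw [PySem.Dict.contains_iff_mem_keys, pvG_keys, PySem.Set.mem_ofList]

theorem pvP_length (labels : List String) (s : String) :
    (pvP labels s).length = (labels.map pvStripOr).count s := by
  have he : ∀ (q : String → Bool),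
      List.countP (fun p : Int × String => q p.2) (PySem.List.enumerate labels) =
        labels.countP q := by
    intro q
    conv_rhs => rw [← PySem.List.map_snd_enumerate labels 0]
    rw [List.countP_map]
    rfl
  rw [pvP, List.length_map, ← List.countP_eq_length_filter,
    he (fun x => pvStripOr x == s), List.count_eq_countP, List.countP_map]
  rfl

theorem pvG_bound (labels : List String) (kv : String × List Int)
    (h : kv ∈ (pvG labels).items) (p : Int) (hp : p ∈ kv.2) :
    0 ≤ p ∧ p < (labels.length : Int) := by
  obtain ⟨k, v⟩ := kv
  have h1 : (pvG labels).get? k = some v :=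
    PySem.Dict.get?_of_mem_items _ h (pvG_nodup labels)
  have h2 : v = pvP labels k := by
    rw [← pvG_getD labels k]
    exact (PySem.Dict.getD_of_get?_eq_some _ [] h1).symm
  rw [h2] at hp
  obtain ⟨q, hq, rfl⟩ := List.mem_map.mp hp
  have hq' := List.mem_of_mem_filter hq
  obtain ⟨j, hj, rfl⟩ := (PySem.List.mem_enumerate_iff _ _ _).mp hq'
  refine ⟨by simp, ?_⟩
  simp
  omega

-- generic write-loop lemmas
theorem pvW_foldl_length (s : String) (l : List (Int × Int)) (o : List String) :
    (l.foldl (pvW s) o).length = o.length := by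
  induction l generalizing o with
  | nil => rfl
  | cons a t ih => simp [List.foldl_cons, ih, pvW]

theorem pvW_foldl_append (s : String) (l : List (Int × Int)) (o : List String) (a : String)
    (h : ∀ kp ∈ l, kp.2.toNat < o.length) :
    l.foldl (pvW s) (o ++ [a]) = l.foldl (pvW s) o ++ [a] := by
  induction l generalizing o with
  | nil => rfl
  | cons b t ih =>
    simp only [List.foldl_cons]
    rw [show pvW s (o ++ [a]) b = pvW s o b ++ [a] from
        List.set_append_left _ _ (h b (by simp))]
    exact ih _ (fun kp hkp => by rw [pvW, List.length_set]; exact h kp (by simp [hkp]))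

theorem pvW_foldl_set_comm (s : String) (l : List (Int × Int)) (o : List String)
    (m : Nat) (v : String) (h : ∀ kp ∈ l, kp.2.toNat ≠ m) :
    l.foldl (pvW s) (o.set m v) = (l.foldl (pvW s) o).set m v := by
  induction l generalizing o with
  | nil => rfl
  | cons b t ih =>
    simp only [List.foldl_cons]
    rw [show pvW s (o.set m v) b = (pvW s o b).set m v from
        List.set_comm _ _ (Ne.symm (h b (by simp)))]
    exact ih _ (fun kp hkp => h kp (by simp [hkp]))

theorem pvInner_append (kv : String × List Int) (o : List String) (a : String)
    (h : ∀ p ∈ kv.2, p.toNat < o.length) :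
    pvInner kv (o ++ [a]) = pvInner kv o ++ [a] := by
  refine pvW_foldl_append _ _ _ _ (fun kp hkp => ?_)
  obtain ⟨k, hk, rfl⟩ := (PySem.List.mem_enumerate_iff _ _ _).mp hkp
  exact h _ (by simp)

theorem pvInner_length (kv : String × List Int) (o : List String) :
    (pvInner kv o).length = o.length := pvW_foldl_length _ _ _

theorem pvInner_set_comm (kv : String × List Int) (o : List String) (m : Nat) (v : String)
    (h : ∀ p ∈ kv.2, p.toNat ≠ m) :
    pvInner kv (o.set m v) = (pvInner kv o).set m v := by
  refine pvW_foldl_set_comm _ _ _ _ _ (fun kp hkp => ?_)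
  obtain ⟨k, hk, rfl⟩ := (PySem.List.mem_enumerate_iff _ _ _).mp hkp
  exact h _ (by simp)

theorem pvScat_append (items : List (String × List Int)) (o : List String) (a : String)
    (h : ∀ kv ∈ items, ∀ p ∈ kv.2, p.toNat < o.length) :
    pvScat items (o ++ [a]) = pvScat items o ++ [a] := by
  induction items generalizing o with
  | nil => rfl
  | cons kv t ih =>
    simp only [pvScat, List.foldl_cons]
    rw [pvInner_append kv o a (h kv (by simp))]
    exact ih _ (fun kv' hkv' p hp => by
      rw [pvInner_length]; exact h kv' (by simp [hkv']) p hp)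

theorem pvScat_set_comm (items : List (String × List Int)) (o : List String) (m : Nat) (v : String)
    (h : ∀ kv ∈ items, ∀ p ∈ kv.2, p.toNat ≠ m) :
    pvScat items (o.set m v) = (pvScat items o).set m v := by
  induction items generalizing o with
  | nil => rfl
  | cons kv t ih =>
    simp only [pvScat, List.foldl_cons]
    rw [pvInner_set_comm kv o m v (h kv (by simp))]
    exact ih _ (fun kv' hkv' p hp => h kv' (by simp [hkv']) p hp)

theorem pvScat_length (items : List (String × List Int)) (o : List String) :
    (pvScat items o).length = o.length := by
  induction items generalizing o with
  | nil => rfl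
  | cons kv t ih =>
    simp only [pvScat, List.foldl_cons] at *
    rw [ih, pvInner_length]

theorem pvTarget_length (pre l : List String) : (pvTarget pre l).length = l.length := by
  induction l generalizing pre with
  | nil => rfl
  | cons a t ih => simp [pvTarget, ih]

theorem pvScat_snoc (items : List (String × List Int)) (kv : String × List Int) (o : List String) :
    pvScat (items ++ [kv]) o = pvInner kv (pvScat items o) := by
  simp [pvScat, List.foldl_append]

theorem pvScat_mid (i₁ i₂ : List (String × List Int)) (kv : String × List Int) (o : List String) :
    pvScat (i₁ ++ kv :: i₂) o = pvScat i₂ (pvInner kv (pvScat i₁ o)) := by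
  simp [pvScat, List.foldl_append]

theorem pvInner_snoc (s : String) (ps : List Int) (m : Int) (o : List String) :
    pvInner (s, ps ++ [m]) o =
      (pvInner (s, ps) o).set m.toNat
        (if ((ps.length : Int) == 0) then s
         else s ++ " (" ++ PySem.Int.toStr ((ps.length : Int) + 1) ++ ")") := by
  unfold pvInner
  rw [PySem.List.enumerate_append, List.foldl_append]
  simp only [PySem.List.enumerate_cons, PySem.List.enumerate_nil, List.foldl_cons,
    List.foldl_nil, zero_add]
  rfl

theorem pvMap_unchanged (i : List (String × List Int)) (lx : String) (nv : List Int)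
    (h : lx ∉ i.map Prod.fst) :
    i.map (fun p => if (p.1 == lx) = true then (lx, nv) else p) = i := by
  induction i with
  | nil => rfl
  | cons a t ih =>
    simp only [List.map_cons, List.mem_cons, not_or] at h ⊢
    rw [if_neg (by simp; exact fun e => h.1 e.symm), ih h.2]

-- the main B-side characterization: the group-and-scatter computes pvTarget
theorem pvBmain (l : List String) :
    pvScat (pvG l).items (List.replicate l.length "") = pvTarget [] (l.map pvStripOr) := by
  induction l using List.reverseRecOn with
  | nil => rfl
  | append_singleton t x ih =>
    have hbound : ∀ kv ∈ (pvG t).items, ∀ p ∈ kv.2, p.toNat < (List.replicate t.length ("":String)).length := by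
      intro kv hkv p hp
      have := pvG_bound t kv hkv p hp
      rw [List.length_replicate]
      omega
    have hG : pvG (t ++ [x]) =
        (pvG t).insert (pvStripOr x) ((pvG t).getD (pvStripOr x) [] ++ [(t.length : Int)]) := by
      unfold pvG
      rw [PySem.List.enumerate_append, List.foldl_append]
      simp only [PySem.List.enumerate_cons, PySem.List.enumerate_nil, List.foldl_cons,
        List.foldl_nil, zero_add]
      rfl
    have hrep : List.replicate (t ++ [x]).length ("":String) = List.replicate t.length "" ++ [""] := by
      rw [List.length_append, List.length_cons, List.length_nil, List.replicate_succ']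
    have hRlen : (pvScat (pvG t).items (List.replicate t.length "")).length = t.length := by
      rw [pvScat_length, List.length_replicate]
    rw [hG, hrep, List.map_append, List.map_cons, List.map_nil, pvTarget_snoc, List.nil_append]
    by_cases hc : (pvG t).contains (pvStripOr x) = true
    · -- pvStripOr x already seen: its entry grows in place
      have hgd : (pvG t).getD (pvStripOr x) [] = pvP t (pvStripOr x) := pvG_getD t _
      have hps : (pvG t).get? (pvStripOr x) = some (pvP t (pvStripOr x)) := by
        have h1 := PySem.Dict.contains_eq_isSome_get? (pvG t) (pvStripOr x)
        rw [hc] at h1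
        obtain ⟨v, hv⟩ := Option.isSome_iff_exists.mp h1.symm
        have h2 := PySem.Dict.getD_of_get?_eq_some (pvG t) [] hv
        rw [hgd] at h2
        rw [hv, h2]
      have hcnt : (pvP t (pvStripOr x)).length = (t.map pvStripOr).count (pvStripOr x) :=
        pvP_length t _
      have hcpos : 0 < (t.map pvStripOr).count (pvStripOr x) :=
        List.count_pos_iff.mpr ((pvG_contains t _).mp hc)
      obtain ⟨i₁, i₂, hsplit⟩ := List.append_of_mem (PySem.Dict.mem_items_of_get?_eq_some _ hps)
      have hnd := pvG_nodup t
      rw [show (pvG t).keys = (pvG t).items.map Prod.fst from rfl, hsplit] at hnd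
      rw [List.map_append, List.map_cons, List.nodup_append] at hnd
      obtain ⟨-, hnd2, hdisj⟩ := hnd
      have h1notin : pvStripOr x ∉ i₁.map Prod.fst :=
        fun hm => hdisj _ hm _ (List.mem_cons_self ..) rfl
      have h2notin : pvStripOr x ∉ i₂.map Prod.fst := (List.nodup_cons.mp hnd2).1
      rw [PySem.Dict.items_insert_of_contains _ _ hc, hgd, hsplit, List.map_append,
        List.map_cons, pvMap_unchanged i₁ _ _ h1notin, pvMap_unchanged i₂ _ _ h2notin]
      simp only [beq_self_eq_true, if_true]
      rw [pvScat_mid, pvInner_snoc,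
        pvScat_set_comm i₂ _ _ _ (fun kv hkv p hp => by
          have := pvG_bound t kv (by rw [hsplit]; simp [hkv]) p hp
          omega),
        ← pvScat_mid, ← hsplit, pvScat_append _ _ _ hbound, ih, hcnt]
      rw [if_neg (by simp; omega)]
      rw [show ((t.length : Int)).toNat = (pvTarget [] (t.map pvStripOr)).length by
        rw [pvTarget_length, List.length_map]; omega]
      rw [pvDec, if_neg (by simp; omega)]
      simp
    · -- first occurrence of pvStripOr x: a fresh entry is appended
      have hc' : (pvG t).contains (pvStripOr x) = false := by
        simpa using hc
      have hnotin : pvStripOr x ∉ t.map pvStripOr := fun hm => hc ((pvG_contains t _).mpr hm)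
      rw [PySem.Dict.items_insert_of_not_contains _ _ hc',
        PySem.Dict.getD_of_not_contains _ [] hc', List.nil_append,
        pvScat_snoc, pvScat_append _ _ _ hbound, ih]
      rw [show ([(t.length : Int)] : List Int) = ([] ++ [(t.length : Int)]) from rfl, pvInner_snoc]
      rw [if_pos (by simp)]
      rw [show ((t.length : Int)).toNat = (pvTarget [] (t.map pvStripOr)).length by
        rw [pvTarget_length, List.length_map]; omega]
      rw [List.count_eq_zero.mpr hnotin, pvDec, if_pos (by simp)]
      show ((pvTarget [] (t.map pvStripOr)) ++ [""]).set
        (pvTarget [] (t.map pvStripOr)).length (pvStripOr x) = _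
      simp

-- ===== VERDICT (by name: the statement is the Claim_ definition above) =====
theorem deduplicate_labels_py_spec : Claim_equal_deduplicate_labels_py := by
  intro labels _
  unfold Spec_deduplicate_labels_py
  rw [pvB_eq, pvBmain, pvA_eq_foldl]
  exact (pvAfold_invariant labels).2
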